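-- pv_equiv track=rewrite | github.com/jungyoonoh/AlgorithmPractice | Python/Programmers/KIT/StackAndQueue/프린터.py | solution
-- ===== SOURCE A (Python) =====
-- from collections import deque
--
-- def solution(priorities, location):
--     answer = 0
--     dq = deque() # 우선순위 포함한 녀석
--     printer = deque(priorities) # 실제로 돌아갈 녀석
--     for i in range(len(priorities)):
--         dq.append((priorities[i], i)) # 원래 번호를 가지고 있도록
--
--     while printer:
--         if printer[0] < max(printer):
--             printer.append(printer.popleft())
--             dq.append(dq.popleft())
--         else:
--             answer += 1
--             if dq[0][1] == location:
--                 break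
--             else:
--                 dq.popleft()
--                 printer.popleft()
--
--     return answer
-- ===== SOURCE B (Python) =====
-- def solution(priorities, location):
--     # Jump straight to the first maximal-priority document each round instead of
--     # rotating the queue one element at a time with twin deques.
--     items = [(p, i) for i, p in enumerate(priorities)]
--     count = 0
--     while items:
--         best = max(p for p, _ in items)
--         j = next(k for k, (p, _) in enumerate(items) if p == best)
--         count += 1
--         if items[j][1] == location:
--             return count
--         items = items[j + 1:] + items[:j]
--     return count
-- ===== Notes on version B (the rewrite author's own statement) =====
-- stated objective: faster
-- what changed: Instead of rotating two synchronized deques one element at a time and recomputing max on every rotation, B keeps a single list of (priority, index) pairs and each round scans once for the first maximal element, prints it, and reassembles the queue by slicing at that position.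
import Mathlib
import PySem

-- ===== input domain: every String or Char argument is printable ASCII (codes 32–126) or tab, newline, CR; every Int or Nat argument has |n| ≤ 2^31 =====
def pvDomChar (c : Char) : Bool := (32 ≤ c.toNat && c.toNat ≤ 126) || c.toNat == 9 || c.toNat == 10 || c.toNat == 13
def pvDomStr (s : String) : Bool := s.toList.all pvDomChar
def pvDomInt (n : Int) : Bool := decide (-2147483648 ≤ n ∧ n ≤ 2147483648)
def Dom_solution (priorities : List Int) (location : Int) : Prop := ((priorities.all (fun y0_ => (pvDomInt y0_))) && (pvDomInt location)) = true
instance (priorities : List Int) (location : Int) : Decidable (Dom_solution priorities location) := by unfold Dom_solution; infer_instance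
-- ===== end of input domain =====

-- B replaces A's one-step deque rotation (with max recomputed at every rotation) by a single
-- scan per printed document that jumps straight to the first maximal element; return values
-- are identical on all inputs (neither program mutates its arguments).

-- ===== PORT A =====

-- max of a nonempty list written as Python's running max (value of max(h :: t));
-- used by the termination measure of solLoop
def bestM : List Int → Int
  | [] => 0
  | h :: t => t.foldl max h

-- helper facts needed by the termination measures of the two loops (cited in decreasing_by)
theorem foldl_max_init_comm (xs : List Int) (a b : Int) :
    xs.foldl max (max a b) = max (xs.foldl max a) b := by
  induction xs generalizing a with
  | nil => rfl
  | cons y ys ih => simp only [List.foldl_cons, max_right_comm a b y, ih]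

theorem maximum_cons_bestM (x : Int) (xs : List Int) :
    (x :: xs).maximum = ((bestM (x :: xs) : Int) : WithBot Int) := by
  induction xs generalizing x with
  | nil => simp [bestM]
  | cons y ys ih =>
    rw [List.maximum_cons, ih y]
    simp only [bestM, List.foldl_cons, ← WithBot.coe_max]
    rw [max_comm x, ← foldl_max_init_comm, max_comm y x]

theorem bestM_perm {l1 l2 : List Int} (h : l1.Perm l2) (h1 : l1 ≠ []) :
    bestM l1 = bestM l2 := by
  match l1, l2, h with
  | [], _, _ => exact absurd rfl h1
  | _ :: _, [], h => exact absurd h.symm (by simp)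
  | a :: s, b :: t, h =>
    have := h.maximum_eq
    rw [maximum_cons_bestM, maximum_cons_bestM] at this
    exact_mod_cast this

theorem bestM_cons_mem (h : Int) (t : List Int) : bestM (h :: t) = h ∨ bestM (h :: t) ∈ t := by
  simpa [bestM] using PySem.List.foldl_max_mem t h

theorem bestM_lt_of_head_lt (h : Int) (t : List Int) (hlt : h < bestM (h :: t)) :
    (t ++ [h]).idxOf (bestM (t ++ [h])) < (h :: t).idxOf (bestM (h :: t)) := by
  have hne : h ≠ bestM (h :: t) := by omega
  have hm : bestM (h :: t) ∈ t := by
    rcases bestM_cons_mem h t with h' | h'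
    · omega
    · exact h'
  have hperm : (t ++ [h]).Perm (h :: t) := by
    simp
  rw [bestM_perm hperm (by simp), List.idxOf_append_of_mem hm, List.idxOf_cons_ne t hne]
  exact Nat.lt_succ_self _

-- the while-loop of A: printer holds the priorities, dq the (priority, original index) pairs.
-- dq is nonempty whenever printer is (they always have equal length when called from
-- `solution`), so the pyGetD default (0, -1) is never the value Python reads.
def solLoop (location : Int) : List Int → List (Int × Int) → Int → Int
  | [], _, answer => answer
  | h :: t, dq, answer =>
    if h < (PySem.List.max? (h :: t) (fun y => y)).getD 0 then
      solLoop location (t ++ [h]) (dq.drop 1 ++ dq.take 1) answer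
    else
      if (PySem.List.pyGetD dq 0 (0, -1)).2 = location then answer + 1
      else solLoop location t (dq.drop 1) (answer + 1)
termination_by printer _ _ => (printer.length, printer.idxOf (bestM printer))
decreasing_by
  · apply Prod.Lex.right'
    · simp
    · rename_i hlt
      rw [PySem.List.max?_id_cons, Option.getD_some] at hlt
      exact bestM_lt_of_head_lt _ _ (by simpa [bestM] using hlt)
  · apply Prod.Lex.left
    simp

def solution (priorities : List Int) (location : Int) : Int :=
  -- for i in range(len(priorities)): dq.append((priorities[i], i))  — the index i is always
  -- in range, so pyGetD's default 0 is never the value Python reads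
  let dq := (PySem.List.pyRange 0 (priorities.length : Int) 1).foldl
      (fun dq i => dq ++ [(PySem.List.pyGetD priorities i 0, i)]) []
  solLoop location priorities dq 0

-- ===== PORT B =====

-- best is attained by some element, so findIdx finds a real position (termination helper)
theorem best_attained (x : Int × Int) (xs : List (Int × Int)) :
    ∃ q ∈ x :: xs, q.1 = xs.foldl (fun acc q => max acc q.1) x.1 := by
  have he : (xs.map Prod.fst).foldl max x.1 = xs.foldl (fun acc q => max acc q.1) x.1 := by
    rw [List.foldl_map]
  rcases PySem.List.foldl_max_mem (xs.map Prod.fst) x.1 with h' | h'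
  · exact ⟨x, List.mem_cons_self, by rw [← he, h']⟩
  · rw [he] at h'
    obtain ⟨q, hq, hq1⟩ := List.mem_map.mp h'
    exact ⟨q, List.mem_cons_of_mem _ hq, hq1⟩

theorem findIdx_best_lt (x : Int × Int) (xs : List (Int × Int)) :
    (x :: xs).findIdx (fun q => q.1 == xs.foldl (fun acc q => max acc q.1) x.1) <
      (x :: xs).length := by
  obtain ⟨q, hq, hq1⟩ := best_attained x xs
  exact List.findIdx_lt_length_of_exists ⟨q, hq, by simp [hq1]⟩

-- the while-loop of B: one scan for the first maximal element per printed document.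
-- items[j] is always in range (j = findIdx of an attained value), so the getD default
-- (0, -1) is never the value Python reads.
def altLoop (location : Int) : List (Int × Int) → Int → Int
  | [], count => count
  | x :: xs, count =>
    let best := xs.foldl (fun acc q => max acc q.1) x.1
    let j := (x :: xs).findIdx (fun q => q.1 == best)
    if ((x :: xs).getD j (0, -1)).2 = location then count + 1
    else altLoop location ((x :: xs).drop (j + 1) ++ (x :: xs).take j) (count + 1)
termination_by items _ => items.length
decreasing_by
  rw [List.foldl_attach (l := xs) (f := fun (acc : Int) (q : Int × Int) => max acc q.1) (b := x.1)]
  have := findIdx_best_lt x xs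
  simp only [List.length_append, List.length_drop, List.length_take, List.length_cons] at *
  omega

def solution_alt (priorities : List Int) (location : Int) : Int :=
  altLoop location ((PySem.List.enumerate priorities 0).map (fun p => (p.2, p.1))) 0

-- ===== PRECONDITION & SPEC =====
def Spec_solution (priorities : List Int) (location : Int) (out : Int) : Prop := out = solution_alt priorities location
instance (priorities : List Int) (location : Int) (out : Int) : Decidable (Spec_solution priorities location out) := by unfold Spec_solution; infer_instance

-- ===== CLAIM (what is proved, stated in full; the proofs are below) =====
def Claim_equal_solution : Prop := ∀ (priorities : List Int) (location : Int), Dom_solution priorities location → Spec_solution priorities location (solution priorities location)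

-- ===== LEMMAS AND PROOFS =====

theorem le_bestM_cons (h : Int) (t : List Int) : h ≤ bestM (h :: t) := by
  simpa [bestM] using (PySem.List.le_foldl_max t h).1

theorem rotToMax (loc : Int) (j : Nat) :
    ∀ (l : List (Int × Int)) (ans : Int),
      l.findIdx (fun q => q.1 == bestM (l.map Prod.fst)) = j → j < l.length →
      solLoop loc (l.map Prod.fst) l ans =
        solLoop loc ((l.drop j ++ l.take j).map Prod.fst) (l.drop j ++ l.take j) ans := by
  induction j with
  | zero => intro l ans _ _; simp
  | succ j ih =>
    intro l ans hfind hlen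
    match l with
    | [] => simp at hlen
    | x :: xs =>
      have hxne : ¬ (x.1 == bestM ((x :: xs).map Prod.fst)) = true := by
        intro hx
        rw [List.findIdx_cons, hx] at hfind
        simp at hfind
      have hxlt : x.1 < bestM ((x :: xs).map Prod.fst) := by
        have hle : x.1 ≤ bestM ((x :: xs).map Prod.fst) := by
          simpa using le_bestM_cons x.1 (xs.map Prod.fst)
        have : x.1 ≠ bestM ((x :: xs).map Prod.fst) := by simpa using hxne
        omega
      have hperm : ((xs ++ [x]).map Prod.fst).Perm ((x :: xs).map Prod.fst) :=
        (List.perm_append_comm (l₁ := xs) (l₂ := [x])).map Prod.fst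
      have hb : bestM ((xs ++ [x]).map Prod.fst) = bestM ((x :: xs).map Prod.fst) :=
        bestM_perm hperm (by simp)
      have hjlt : j < xs.length := by
        have h2 := hlen
        simp only [List.length_cons] at h2
        omega
      have hfind' : (xs ++ [x]).findIdx (fun q => q.1 == bestM ((xs ++ [x]).map Prod.fst)) = j := by
        rw [hb]
        have hfx : xs.findIdx (fun q => q.1 == bestM ((x :: xs).map Prod.fst)) = j := by
          rw [List.findIdx_cons] at hfind
          rcases hc : (x.1 == bestM ((x :: xs).map Prod.fst)) with _ | _
          · rw [hc] at hfind; simpa using hfind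
          · exact absurd hc hxne
        rw [List.findIdx_append, hfx, if_pos hjlt]
      have hlen' : j < (xs ++ [x]).length := by
        simp only [List.length_append, List.length_cons]
        omega
      have hstep : solLoop loc ((x :: xs).map Prod.fst) (x :: xs) ans =
          solLoop loc ((xs ++ [x]).map Prod.fst) (xs ++ [x]) ans := by
        simp only [List.map_cons]
        rw [solLoop]
        rw [PySem.List.max?_id_cons, Option.getD_some]
        rw [if_pos (by simpa [bestM] using hxlt)]
        simp [List.map_append]
      rw [hstep, ih (xs ++ [x]) ans hfind' hlen']
      have hjxs : j ≤ xs.length := Nat.le_of_lt hjlt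
      rw [List.drop_append_of_le_length hjxs, List.take_append_of_le_length hjxs]
      simp [List.append_assoc]

theorem loops_eq (loc : Int) : ∀ (n : Nat) (l : List (Int × Int)), l.length = n →
    ∀ ans, solLoop loc (l.map Prod.fst) l ans = altLoop loc l ans := by
  intro n
  induction n using Nat.strong_induction_on with
  | _ n ih =>
    intro l hn ans
    match l with
    | [] =>
      simp only [List.map_nil]
      rw [solLoop, altLoop]
    | x :: xs =>
      have hbest : xs.foldl (fun acc q => max acc q.1) x.1 = bestM ((x :: xs).map Prod.fst) := by
        simp only [List.map_cons, bestM]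
        rw [List.foldl_map]
      set p := fun q : Int × Int => q.1 == xs.foldl (fun acc q => max acc q.1) x.1 with hp
      set j := (x :: xs).findIdx p with hj
      have hjlt : j < (x :: xs).length := findIdx_best_lt x xs
      have hfind : (x :: xs).findIdx (fun q => q.1 == bestM ((x :: xs).map Prod.fst)) = j := by
        rw [← hbest]
      rw [rotToMax loc j (x :: xs) ans hfind hjlt]
      have hdl : (x :: xs).drop j = (x :: xs)[j] :: (x :: xs).drop (j + 1) :=
        List.drop_eq_getElem_cons hjlt
      have hr : (x :: xs).drop j ++ (x :: xs).take j =
          (x :: xs)[j] :: ((x :: xs).drop (j + 1) ++ (x :: xs).take j) := by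
        rw [hdl]; rfl
      have hpj : p ((x :: xs)[j]) = true := List.findIdx_getElem (w := hjlt)
      have hbj : (x :: xs)[j].1 = bestM ((x :: xs).map Prod.fst) := by
        rw [← hbest]
        simpa [hp] using hpj
      have hrperm : (((x :: xs).drop j ++ (x :: xs).take j).map Prod.fst).Perm
          ((x :: xs).map Prod.fst) := by
        refine List.Perm.map _ ?_
        have hpa := List.perm_append_comm (l₁ := (x :: xs).drop j) (l₂ := (x :: xs).take j)
        rwa [List.take_append_drop] at hpa
      have hrb : bestM ((((x :: xs).drop j ++ (x :: xs).take j)).map Prod.fst) =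
          bestM ((x :: xs).map Prod.fst) := by
        refine bestM_perm hrperm ?_
        rw [hr]; simp
      -- unfold solLoop at the rotated list
      rw [hr]
      simp only [List.map_cons]
      rw [solLoop]
      rw [PySem.List.max?_id_cons, Option.getD_some]
      have hmx : ((((x :: xs).drop (j + 1) ++ (x :: xs).take j)).map Prod.fst).foldl max
          (x :: xs)[j].1 = (x :: xs)[j].1 := by
        have : bestM ((x :: xs)[j].1 :: ((x :: xs).drop (j + 1) ++ (x :: xs).take j).map Prod.fst)
            = bestM ((x :: xs).map Prod.fst) := by
          rw [← hrb, hr]; simp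
        simpa [bestM, hbj] using this
      rw [hmx, if_neg (lt_irrefl _)]
      rw [PySem.List.pyGetD_zero_cons]
      -- unfold altLoop
      conv_rhs => rw [altLoop]
      rw [← hp, ← hj, List.getD_eq_getElem _ _ hjlt]
      by_cases hloc : (x :: xs)[j].2 = loc
      · rw [if_pos hloc, if_pos hloc]
      · rw [if_neg hloc, if_neg hloc]
        simp only [List.drop_succ_cons]
        have hlen2 : ((x :: xs).drop (j + 1) ++ (x :: xs).take j).length < n := by
          simp only [List.length_append, List.length_drop, List.length_take]
          simp only [List.length_cons] at hjlt ⊢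
          subst hn
          simp only [List.length_cons]
          omega
        exact ih _ hlen2 _ rfl (ans + 1)

theorem build_eq (pr : List Int) :
    (PySem.List.pyRange 0 (pr.length : Int) 1).foldl
        (fun dq i => dq ++ [(PySem.List.pyGetD pr i 0, i)]) [] =
      (PySem.List.enumerate pr 0).map (fun p => (p.2, p.1)) := by
  rw [PySem.List.foldl_append_singleton_eq_map, PySem.List.enumerate_eq_map_pyRange (d := 0)]
  simp [List.map_map]

theorem fst_enum (pr : List Int) :
    ((PySem.List.enumerate pr 0).map (fun p => (p.2, p.1))).map Prod.fst = pr := by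
  simp only [List.map_map]
  exact PySem.List.map_snd_enumerate pr 0

-- ===== VERDICT (by name: the statement is the Claim_ definition above) =====
theorem solution_spec : Claim_equal_solution := by
  intro priorities location _
  unfold Spec_solution solution solution_alt
  rw [build_eq]
  have := loops_eq location (((PySem.List.enumerate priorities 0).map (fun p => (p.2, p.1))).length)
    ((PySem.List.enumerate priorities 0).map (fun p => (p.2, p.1))) rfl 0
  rw [fst_enum] at this
  exact this
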